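-- pv_equiv track=rewrite | github.com/ege-erdil/political-orientation | analytics.py | anova
-- ===== SOURCE A (Python) =====
-- def anova(answers, scores):
--     groups = []
--     unique_answers = sorted(list(set(answers)))
--
--     for j in range(len(unique_answers)):
--         groups.append([])
--         for k in range(len(answers)):
--             if answers[k] == unique_answers[j]:
--                 groups[j].append(scores[k])
--
--     return groups
-- ===== SOURCE B (Python) =====
-- def anova(answers, scores):
--     d = {}
--     for a, s in zip(answers, scores):
--         d[a] = d.get(a, []) + [s]
--     return [d[a] for a in sorted(d)]
-- ===== Notes on version B (the rewrite author's own statement) =====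
-- stated objective: faster
-- what changed: Replaces the nested scan (for each sorted unique answer, rescan all answers) by a single pass that groups scores into a dict keyed by answer, then emits the groups in sorted-key order.
import Mathlib
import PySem

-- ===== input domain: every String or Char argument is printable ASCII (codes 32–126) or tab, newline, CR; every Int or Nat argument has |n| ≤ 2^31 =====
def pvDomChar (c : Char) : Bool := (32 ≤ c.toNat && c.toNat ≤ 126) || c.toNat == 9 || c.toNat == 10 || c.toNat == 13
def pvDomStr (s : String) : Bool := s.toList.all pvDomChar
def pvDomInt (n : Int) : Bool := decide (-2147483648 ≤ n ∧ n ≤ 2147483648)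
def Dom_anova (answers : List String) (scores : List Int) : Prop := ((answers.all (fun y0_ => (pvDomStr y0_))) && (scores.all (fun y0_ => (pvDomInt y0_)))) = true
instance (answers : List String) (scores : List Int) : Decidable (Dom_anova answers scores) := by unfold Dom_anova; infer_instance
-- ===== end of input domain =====

-- B groups scores into a dict keyed by answer in one pass, then lists the groups by sorted key (faster: no rescan per unique answer).

-- ===== PORT A =====
def anova (answers : List String) (scores : List Int) : List (List Int) :=
  let unique := PySem.List.sorted (PySem.Set.ofList answers) (fun x => x) false
  (PySem.List.pyRange 0 (PySem.List.len unique) 1).foldl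
    (fun groups j =>
      groups ++ [(PySem.List.pyRange 0 (PySem.List.len answers) 1).foldl
        (fun g k =>
          if PySem.List.pyGetD answers k "" = PySem.List.pyGetD unique j "" then
            g ++ [PySem.List.pyGetD scores k 0]
          else g) []]) []

-- ===== PORT B =====
def anova_alt (answers : List String) (scores : List Int) : List (List Int) :=
  let d := (answers.zip scores).foldl
    (fun d p => PySem.Dict.modify d p.1 [] (fun l => l ++ [p.2])) PySem.Dict.empty
  (PySem.List.sorted (PySem.Dict.keys d) (fun x => x) false).map
    (fun a => PySem.Dict.getD d a [])

-- ===== PRECONDITION & SPEC =====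
-- Pre_ excludes inputs where A raises IndexError (scores shorter than answers: scores[k] out of range).
def Pre_anova (answers : List String) (scores : List Int) : Prop := answers.length ≤ scores.length
instance (answers : List String) (scores : List Int) : Decidable (Pre_anova answers scores) := by unfold Pre_anova; infer_instance
def pvWitness_anova : List String × List Int := (["b", "a", "b"], [1, 2, 3])

def Spec_anova (answers : List String) (scores : List Int) (out : List (List Int)) : Prop := out = anova_alt answers scores
instance (answers : List String) (scores : List Int) (out : List (List Int)) : Decidable (Spec_anova answers scores out) := by unfold Spec_anova; infer_instance

-- ===== CLAIM =====
def Claim_equal_anova : Prop := ∀ (answers : List String) (scores : List Int), Dom_anova answers scores → Pre_anova answers scores → Spec_anova answers scores (anova answers scores)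
-- ===== LEMMAS AND PROOFS =====

-- A's inner loop over indices equals a filter-map over the zipped pairs.
theorem inner_loop_eq (u : String) :
    ∀ (answers : List String) (scores : List Int) (acc : List Int),
      answers.length ≤ scores.length →
      (List.range answers.length).foldl
        (fun g k => if answers.getD k "" = u then g ++ [scores.getD k 0] else g) acc
      = acc ++ ((answers.zip scores).filter (fun p => p.1 == u)).map (·.2) := by
  intro answers
  induction answers with
  | nil => intro scores acc _; simp
  | cons a A ih =>
    intro scores acc h
    cases scores with
    | nil => simp at h
    | cons s S =>
      simp only [List.length_cons, List.range_succ_eq_map, List.foldl_cons, List.foldl_map,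
        List.getD_cons_succ, List.getD_cons_zero, List.zip_cons_cons, List.filter_cons]
      rw [ih S _ (by simpa using h)]
      by_cases hu : a = u
      · simp [hu]
      · simp [hu, beq_iff_eq]

def theGroup (answers : List String) (scores : List Int) (u : String) : List Int :=
  ((answers.zip scores).filter (fun p => p.1 == u)).map (fun p => p.2)

theorem inner_eq (answers : List String) (scores : List Int)
    (h : answers.length ≤ scores.length) (u : String) :
    (PySem.List.pyRange 0 (PySem.List.len answers) 1).foldl
      (fun g k => if PySem.List.pyGetD answers k "" = u then g ++ [PySem.List.pyGetD scores k 0] else g) []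
    = theGroup answers scores u := by
  rw [PySem.List.len_eq, PySem.List.pyRange_one]
  simp only [Int.sub_zero, Int.toNat_natCast, List.foldl_map, zero_add, PySem.List.pyGetD_natCast]
  exact inner_loop_eq u answers scores [] h

theorem anova_eq_map (answers : List String) (scores : List Int)
    (h : answers.length ≤ scores.length) :
    anova answers scores
    = (PySem.List.sorted (PySem.Set.ofList answers) (fun x => x) false).map (theGroup answers scores) := by
  unfold anova
  rw [PySem.List.foldl_append_singleton_eq_map]
  rw [List.nil_append]
  rw [List.map_congr_left (fun j _ => inner_eq answers scores h (PySem.List.pyGetD (PySem.List.sorted (PySem.Set.ofList answers) (fun x => x) false) j ""))]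
  rw [show (fun j => theGroup answers scores (PySem.List.pyGetD (PySem.List.sorted (PySem.Set.ofList answers) (fun x => x) false) j "")) = (theGroup answers scores) ∘ (fun j => PySem.List.pyGetD (PySem.List.sorted (PySem.Set.ofList answers) (fun x => x) false) j "") from rfl]
  rw [← List.map_map, PySem.List.map_pyGetD_pyRange_zero]

theorem alt_eq_map (answers : List String) (scores : List Int)
    (h : answers.length ≤ scores.length) :
    anova_alt answers scores
    = (PySem.List.sorted (PySem.Set.ofList answers) (fun x => x) false).map (theGroup answers scores) := by
  unfold anova_alt
  dsimp only
  have hkeys : ((answers.zip scores).foldl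
      (fun d p => PySem.Dict.modify d p.1 [] (fun l => l ++ [p.2])) PySem.Dict.empty).keys
      = PySem.Set.ofList answers := by
    rw [PySem.Dict.keys_foldl_modify_key]
    rw [PySem.Dict.keys_empty, PySem.Set.update_nil_left, List.map_fst_zip h]
  rw [hkeys]
  apply List.map_congr_left
  intro u _
  rw [PySem.Dict.getD_foldl_modify_append, PySem.Dict.getD_empty, List.nil_append]
  rfl

-- ===== VERDICT =====
theorem anova_spec : Claim_equal_anova := by
  intro answers scores _ hpre
  unfold Pre_anova at hpre
  unfold Spec_anova
  rw [anova_eq_map answers scores hpre, alt_eq_map answers scores hpre]
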